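-- pv_equiv track=rewrite | github.com/mrbartrns/algorithm-and-structure | BOJ/exaustive_search_boj/remote_controller.py | solve
-- ===== SOURCE A (Python) =====
-- enable = {str(i) for i in range(10)}
--
-- def solve(n):
--     # case 1
--     min_cnt = abs(n - 100)
--
--     # 500000만보다 크면서 모든 숫자를 거치는 1000000만까지 브루트 포스 진행
--     for num in range(1000001):
--         str_num = str(num)
--         for j in range(len(str_num)):
--             if str_num[j] not in enable:
--                 break
--             elif j == len(str_num) - 1:
--                 min_cnt = min(min_cnt, abs(n - num) + len(str_num))
--     return min_cnt
-- ===== SOURCE B (Python) =====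
-- def solve(n):
--     best = abs(n - 100)
--     lo = 0
--     for d in range(1, 8):
--         hi = min(10 ** d - 1, 1000000)
--         c = min(max(n, lo), hi)
--         best = min(best, abs(n - c) + d)
--         lo = hi + 1
--     return best
-- ===== Notes on version B (the rewrite author's own statement) =====
-- stated objective: faster
-- what changed: Replaces A's brute-force scan of all 10^6+1 candidate numbers (with a per-number digit-validity inner loop) by a closed form: clamp n into each of the 7 digit-length bands [0,9],[10,99],...,[1000000,1000000] and take the min of those 7 candidates and abs(n-100).
import Mathlib
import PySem

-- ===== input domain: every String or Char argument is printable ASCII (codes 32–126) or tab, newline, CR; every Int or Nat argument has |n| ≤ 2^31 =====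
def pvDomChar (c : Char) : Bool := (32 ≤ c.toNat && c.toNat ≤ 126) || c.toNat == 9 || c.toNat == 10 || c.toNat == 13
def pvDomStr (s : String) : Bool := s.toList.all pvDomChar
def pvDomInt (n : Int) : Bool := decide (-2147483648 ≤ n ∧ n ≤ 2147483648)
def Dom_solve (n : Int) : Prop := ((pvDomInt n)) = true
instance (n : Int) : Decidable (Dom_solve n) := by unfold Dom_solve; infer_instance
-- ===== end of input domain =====

-- B replaces A's brute force over all 10^6+1 candidate numbers by clamping n into each
-- digit-length band (7 closed-form candidates plus abs(n-100)); objective: faster (constant work).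

-- ===== PORT A =====
-- enable = {str(i) for i in range(10)}
def pvEnable : PySem.Set String :=
  PySem.Set.ofList ((PySem.List.pyRange 0 10 1).map PySem.Int.toStr)

-- inner loop: for j in range(len(str_num)): if str_num[j] not in enable: break
--             elif j == len(str_num) - 1: min_cnt = min(min_cnt, upd)
def pvInner (s : String) (upd : Int) : List Int → Int → Int
  | [], minCnt => minCnt
  | j :: rest, minCnt =>
    match PySem.Str.pyGet? s j with
    | none => minCnt   -- unreachable: j ranges over range(len(s))
    | some ch =>
      if PySem.Set.contains pvEnable (String.ofList [ch]) = false then minCnt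
      else if (j : Int) = PySem.Str.len s - 1 then pvInner s upd rest (min minCnt upd)
      else pvInner s upd rest minCnt

def solve (n : Int) : Int :=
  (PySem.List.pyRange 0 1000001 1).foldl
    (fun minCnt num =>
      let strNum := PySem.Int.toStr num
      pvInner strNum (|n - num| + PySem.Str.len strNum)
        (PySem.List.pyRange 0 (PySem.Str.len strNum) 1) minCnt)
    |n - 100|

-- ===== PORT B =====
-- 10 ** d ported as 10 ^ d.toNat (exact: d ranges over 1..7)
def solve_alt (n : Int) : Int :=
  ((PySem.List.pyRange 1 8 1).foldl
    (fun (st : Int × Int) d =>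
      let hi := min (10 ^ d.toNat - 1) 1000000
      let c := min (max n st.2) hi
      (min st.1 (|n - c| + d), hi + 1))
    (|n - 100|, 0)).1

-- ===== PRECONDITION & SPEC =====
def Spec_solve (n : Int) (out : Int) : Prop := out = solve_alt n
instance (n : Int) (out : Int) : Decidable (Spec_solve n out) := by unfold Spec_solve; infer_instance

-- ===== CLAIM (what is proved, stated in full; the proofs are below) =====
def Claim_equal_solve : Prop := ∀ (n : Int), Dom_solve n → Spec_solve n (solve n)

-- ===== LEMMAS AND PROOFS =====

-- decimal digits of a natural number (semantic model of Nat.toDigits 10)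
def pvDigits (n : Nat) : List Char :=
  if _h : n < 10 then [Nat.digitChar n]
  else pvDigits (n / 10) ++ [Nat.digitChar (n % 10)]
decreasing_by omega

lemma pvToDigitsCore_eq : ∀ (f n : Nat) (acc : List Char), n < f →
    Nat.toDigitsCore 10 f n acc = pvDigits n ++ acc := by
  intro f
  induction f with
  | zero => intro n acc h; omega
  | succ f ih =>
    intro n acc h
    by_cases h10 : n / 10 = 0
    · have hn : n < 10 := by omega
      simp only [Nat.toDigitsCore, h10, if_true]
      rw [pvDigits, dif_pos hn, Nat.mod_eq_of_lt hn]
      rfl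
    · simp only [Nat.toDigitsCore, h10, if_false]
      rw [ih (n / 10) _ (by omega)]
      conv_rhs => rw [pvDigits]
      rw [dif_neg (by omega : ¬ n < 10)]
      simp

lemma pvToDigits_eq (n : Nat) : Nat.toDigits 10 n = pvDigits n := by
  have := pvToDigitsCore_eq (n + 1) n [] (by omega)
  simpa [Nat.toDigits] using this

lemma pvDigits_ne_nil (n : Nat) : pvDigits n ≠ [] := by
  rw [pvDigits]; split <;> simp

-- every char str(num) produces is a decimal digit, hence in enable
lemma pvDigits_enable : ∀ (m : Nat), ∀ c ∈ pvDigits m,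
    PySem.Set.contains pvEnable (String.ofList [c]) = true := by
  intro m
  induction m using Nat.strong_induction_on with
  | _ m ih =>
    intro c hc
    rw [pvDigits] at hc
    split at hc
    · next hm =>
      simp only [List.mem_singleton] at hc
      subst hc
      interval_cases m <;> decide
    · next hm =>
      rcases List.mem_append.mp hc with h | h
      · exact ih (m / 10) (by omega) c h
      · simp only [List.mem_singleton] at h
        subst h
        have h10 : m % 10 < 10 := by omega
        revert h10
        generalize m % 10 = k
        intro h10
        interval_cases k <;> decide

-- digit length, as an Int
def Lint (x : Int) : Int := ((PySem.Int.toChars x).length : Int)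

lemma Lint_eq_pvDigits (x : Int) (hx : 0 ≤ x) :
    Lint x = ((pvDigits x.toNat).length : Int) := by
  unfold Lint PySem.Int.toChars
  rw [if_neg (by omega), pvToDigits_eq]

lemma pvLen_base (m : Nat) (h : m < 10) : (pvDigits m).length = 1 := by
  rw [pvDigits, dif_pos h]; rfl

lemma pvLen_step (m : Nat) (h : 10 ≤ m) :
    (pvDigits m).length = (pvDigits (m / 10)).length + 1 := by
  rw [pvDigits, dif_neg (by omega : ¬ m < 10)]; simp

lemma Lint_1 (x : Int) (h1 : 0 ≤ x) (h2 : x < 10) : Lint x = 1 := by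
  rw [Lint_eq_pvDigits x h1, pvLen_base _ (by omega)]; rfl
lemma Lint_2 (x : Int) (h1 : 10 ≤ x) (h2 : x < 100) : Lint x = 2 := by
  rw [Lint_eq_pvDigits x (by omega), pvLen_step _ (by omega), pvLen_base _ (by omega)]; rfl
lemma Lint_3 (x : Int) (h1 : 100 ≤ x) (h2 : x < 1000) : Lint x = 3 := by
  rw [Lint_eq_pvDigits x (by omega), pvLen_step _ (by omega), pvLen_step _ (by omega),
    pvLen_base _ (by omega)]; rfl
lemma Lint_4 (x : Int) (h1 : 1000 ≤ x) (h2 : x < 10000) : Lint x = 4 := by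
  rw [Lint_eq_pvDigits x (by omega), pvLen_step _ (by omega), pvLen_step _ (by omega),
    pvLen_step _ (by omega), pvLen_base _ (by omega)]; rfl
lemma Lint_5 (x : Int) (h1 : 10000 ≤ x) (h2 : x < 100000) : Lint x = 5 := by
  rw [Lint_eq_pvDigits x (by omega), pvLen_step _ (by omega), pvLen_step _ (by omega),
    pvLen_step _ (by omega), pvLen_step _ (by omega), pvLen_base _ (by omega)]; rfl
lemma Lint_6 (x : Int) (h1 : 100000 ≤ x) (h2 : x < 1000000) : Lint x = 6 := by
  rw [Lint_eq_pvDigits x (by omega), pvLen_step _ (by omega), pvLen_step _ (by omega),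
    pvLen_step _ (by omega), pvLen_step _ (by omega), pvLen_step _ (by omega),
    pvLen_base _ (by omega)]; rfl
lemma Lint_7 (x : Int) (h1 : 1000000 ≤ x) (h2 : x < 10000000) : Lint x = 7 := by
  rw [Lint_eq_pvDigits x (by omega), pvLen_step _ (by omega), pvLen_step _ (by omega),
    pvLen_step _ (by omega), pvLen_step _ (by omega), pvLen_step _ (by omega),
    pvLen_step _ (by omega), pvLen_base _ (by omega)]; rfl

-- the inner digit-check loop always reaches the last index and performs the single update
lemma pvInner_go (s : String) (upd : Int)
    (hd : ∀ c ∈ s.toList, PySem.Set.contains pvEnable (String.ofList [c]) = true) :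
    ∀ (fuel k : Nat) (minCnt : Int), s.toList.length - k ≤ fuel → k < s.toList.length →
      pvInner s upd (PySem.List.pyRange (k : Int) (PySem.Str.len s) 1) minCnt = min minCnt upd := by
  intro fuel
  induction fuel with
  | zero => intro k minCnt hf hk; omega
  | succ fuel ih =>
    intro k minCnt hf hk
    rw [PySem.List.pyRange_one_cons (by rw [PySem.Str.len_eq]; exact_mod_cast hk)]
    have hget : PySem.Str.pyGet? s (k : Int) = some s.toList[k] := by
      rw [PySem.Str.pyGet?_eq, PySem.Chars.pyGet?]
      rw [PySem.List.pyGet?_natCast]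
      exact List.getElem?_eq_getElem hk
    rw [pvInner]
    split
    · next heq => rw [hget] at heq; cases heq
    next ch heq =>
    have hch : ch = s.toList[k] := by rw [hget] at heq; injection heq with h; exact h.symm
    subst hch
    rw [hd s.toList[k] (List.getElem_mem hk)]
    simp only [Bool.true_eq_false, if_false]
    by_cases hlast : (k : Int) = PySem.Str.len s - 1
    · rw [if_pos hlast]
      rw [PySem.List.pyRange_one_eq_nil (by rw [PySem.Str.len_eq] at hlast ⊢; omega)]
      rfl
    · rw [if_neg hlast]
      have hk1 : k + 1 < s.toList.length := by
        rw [PySem.Str.len_eq] at hlast; omega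
      have := ih (k + 1) minCnt (by omega) hk1
      rw [← this]
      norm_num

lemma pvInner_full (s : String) (upd minCnt : Int)
    (hd : ∀ c ∈ s.toList, PySem.Set.contains pvEnable (String.ofList [c]) = true)
    (hne : s.toList ≠ []) :
    pvInner s upd (PySem.List.pyRange 0 (PySem.Str.len s) 1) minCnt = min minCnt upd := by
  have hlen : 0 < s.toList.length := List.length_pos_iff.mpr hne
  have := pvInner_go s upd hd s.toList.length 0 minCnt (by omega) hlen
  simpa using this

-- a min-fold over a list is absorbed once all remaining values exceed the accumulator
lemma pvFoldl_min_skip (g : Int → Int) :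
    ∀ (l : List Int) (a : Int), (∀ x ∈ l, a ≤ g x) →
      l.foldl (fun b x => min b (g x)) a = a := by
  intro l
  induction l with
  | nil => intro a _; rfl
  | cons x t ih =>
    intro a h
    simp only [List.foldl_cons]
    rw [min_eq_left (h x List.mem_cons_self)]
    exact ih a (fun y hy => h y (List.mem_cons_of_mem _ hy))

-- a min-fold equals min with the value at any minimizing member
lemma pvFoldl_min_clamp (g : Int → Int) (c : Int) :
    ∀ (l : List Int) (m : Int), c ∈ l → (∀ x ∈ l, g c ≤ g x) →
      l.foldl (fun a x => min a (g x)) m = min m (g c) := by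
  intro l
  induction l with
  | nil => intro m hc _; exact absurd hc (List.not_mem_nil)
  | cons x t ih =>
    intro m hc hmin
    simp only [List.foldl_cons]
    by_cases hct : c ∈ t
    · rw [ih _ hct (fun y hy => hmin y (List.mem_cons_of_mem _ hy))]
      have : g c ≤ g x := hmin x List.mem_cons_self
      omega
    · have hcx : c = x := by
        rcases List.mem_cons.mp hc with h | h
        · exact h
        · exact absurd h hct
      subst hcx
      exact pvFoldl_min_skip g t (min m (g c))
        (fun y hy => le_trans (min_le_right _ _) (hmin y (List.mem_cons_of_mem _ hy)))

-- on one digit-length band the minimum is attained at n clamped into the band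
lemma pvChunk_fold (n lo b d : Int) (h : lo < b)
    (hL : ∀ x, lo ≤ x → x < b → Lint x = d) (m : Int) :
    (PySem.List.pyRange lo b 1).foldl (fun a x => min a (|n - x| + Lint x)) m
      = min m (|n - min (max n lo) (b - 1)| + d) := by
  set c := min (max n lo) (b - 1) with hc
  have hcmem : c ∈ PySem.List.pyRange lo b 1 := PySem.List.mem_pyRange_one.mpr (by omega)
  rw [PySem.List.foldl_congr_mem _ _ (fun a x => min a (|n - x| + d)) m ?_]
  · rw [pvFoldl_min_clamp (fun x => |n - x| + d) c _ m hcmem ?_]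
    intro x hx
    have hx' := PySem.List.mem_pyRange_one.mp hx
    have h1 : |n - c| ≤ |n - x| := by
      rw [abs_eq_max_neg, abs_eq_max_neg]; omega
    simpa using h1
  · intro a x hx
    have hx' := PySem.List.mem_pyRange_one.mp hx
    rw [hL x hx'.1 hx'.2]

set_option maxHeartbeats 4000000 in
lemma pvSolveAlt_eq (n : Int) : solve_alt n =
    min (min (min (min (min (min (min (|n - 100|)
      (|n - min (max n 0) 9| + 1))
      (|n - min (max n 10) 99| + 2))
      (|n - min (max n 100) 999| + 3))
      (|n - min (max n 1000) 9999| + 4))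
      (|n - min (max n 10000) 99999| + 5))
      (|n - min (max n 100000) 999999| + 6))
      (|n - min (max n 1000000) 1000000| + 7) := by
  unfold solve_alt
  rw [show PySem.List.pyRange 1 8 1 = [1, 2, 3, 4, 5, 6, 7] from by decide]
  simp only [List.foldl_cons, List.foldl_nil]
  norm_num [show Int.toNat 2 = 2 from rfl, show Int.toNat 3 = 3 from rfl,
    show Int.toNat 4 = 4 from rfl, show Int.toNat 5 = 5 from rfl,
    show Int.toNat 6 = 6 from rfl, show Int.toNat 7 = 7 from rfl]

set_option maxHeartbeats 2000000 in
lemma pvSolve_eq (n : Int) : solve n = solve_alt n := by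
  unfold solve
  rw [PySem.List.foldl_congr_mem _ _ (fun a (x : Int) => min a (|n - x| + Lint x)) _ ?_]
  · rw [PySem.List.pyRange_one_append 0 10 1000001 (by norm_num) (by norm_num),
      PySem.List.pyRange_one_append 10 100 1000001 (by norm_num) (by norm_num),
      PySem.List.pyRange_one_append 100 1000 1000001 (by norm_num) (by norm_num),
      PySem.List.pyRange_one_append 1000 10000 1000001 (by norm_num) (by norm_num),
      PySem.List.pyRange_one_append 10000 100000 1000001 (by norm_num) (by norm_num),
      PySem.List.pyRange_one_append 100000 1000000 1000001 (by norm_num) (by norm_num)]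
    simp only [List.foldl_append]
    rw [pvChunk_fold n 0 10 1 (by norm_num) (fun x h1 h2 => Lint_1 x h1 h2),
      pvChunk_fold n 10 100 2 (by norm_num) (fun x h1 h2 => Lint_2 x h1 h2),
      pvChunk_fold n 100 1000 3 (by norm_num) (fun x h1 h2 => Lint_3 x h1 h2),
      pvChunk_fold n 1000 10000 4 (by norm_num) (fun x h1 h2 => Lint_4 x h1 h2),
      pvChunk_fold n 10000 100000 5 (by norm_num) (fun x h1 h2 => Lint_5 x h1 h2),
      pvChunk_fold n 100000 1000000 6 (by norm_num) (fun x h1 h2 => Lint_6 x h1 h2),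
      pvChunk_fold n 1000000 1000001 7 (by norm_num)
        (fun x h1 h2 => Lint_7 x h1 (by omega))]
    rw [pvSolveAlt_eq]
    norm_num
  · intro acc x hx
    have hx' := PySem.List.mem_pyRange_one.mp hx
    have hx0 : 0 ≤ x := hx'.1
    have htl : (PySem.Int.toStr x).toList = pvDigits x.toNat := by
      rw [PySem.Int.toList_toStr]
      unfold PySem.Int.toChars
      rw [if_neg (by omega), pvToDigits_eq]
    have hlen : PySem.Str.len (PySem.Int.toStr x) = Lint x := by
      rw [PySem.Str.len_eq, PySem.Int.toList_toStr]; rfl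
    dsimp only
    rw [pvInner_full _ _ _ ?_ ?_, hlen]
    · rw [htl]; exact pvDigits_enable x.toNat
    · rw [htl]; exact pvDigits_ne_nil x.toNat

-- ===== VERDICT (by name: the statement is the Claim_ definition above) =====
theorem solve_spec : Claim_equal_solve := by
  intro n _
  unfold Spec_solve
  exact pvSolve_eq n
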